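-- pv_equiv track=rewrite | github.com/TommyTheCat135/Programowanie-i-algorytmika | zad_domowe.1.py | czy_ciekawocyfrowa
-- ===== SOURCE A (Python) =====
-- def czy_ciekawocyfrowa(n):
--     n = str(n)
--
--     if len(n) == 1:
--         return True
--
--     for i in range(len(n) - 1):
--         if n[i] == n[i + 1]:
--             return False
--
--     return True
-- ===== SOURCE B (Python) =====
-- def czy_ciekawocyfrowa(n):
--     m = abs(n)
--     while m >= 10:
--         if m % 10 == (m // 10) % 10:
--             return False
--         m //= 10
--     return True
-- ===== Notes on version B (the rewrite author's own statement) =====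
-- stated objective: alternative
-- what changed: Replaced the string conversion and indexed pairwise character scan by pure integer arithmetic on abs(n): repeatedly compare its last two decimal digits via remainder and floor division by ten, never building str(n) at all.
import Mathlib
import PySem

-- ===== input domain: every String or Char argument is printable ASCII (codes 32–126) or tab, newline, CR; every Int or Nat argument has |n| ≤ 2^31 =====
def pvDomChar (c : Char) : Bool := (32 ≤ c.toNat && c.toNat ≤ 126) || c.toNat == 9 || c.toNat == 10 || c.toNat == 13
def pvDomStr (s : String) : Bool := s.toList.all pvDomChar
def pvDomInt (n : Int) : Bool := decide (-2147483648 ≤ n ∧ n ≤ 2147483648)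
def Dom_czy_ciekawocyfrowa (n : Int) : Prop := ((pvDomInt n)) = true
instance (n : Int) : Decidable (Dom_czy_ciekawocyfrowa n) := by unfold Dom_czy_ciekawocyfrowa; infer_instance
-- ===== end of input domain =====

-- B drops the string conversion entirely and compares adjacent decimal digits of abs(n)
-- by remainder and floor division by ten. Objective: alternative (same cost, no string).

-- ===== PORT A =====
-- the for-loop over i in range(len(n)-1), as index recursion with early return False
def czyLoopA (l : List Char) (i : Nat) : Bool :=
  if _h : i + 1 < l.length then
    if l[i] = l[i + 1] then false else czyLoopA l (i + 1)
  else true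
termination_by l.length - i

def czy_ciekawocyfrowa (n : Int) : Bool :=
  let s := (PySem.Int.toStr n).toList
  if s.length = 1 then true
  else czyLoopA s 0

-- ===== PORT B =====
-- the while-loop of Source B: while the number still has two digits, compare its last two
def czyLoopB (m : Int) : Bool :=
  if _h : 10 ≤ m then
    if PySem.Int.mod m 10 = PySem.Int.mod (PySem.Int.floordiv m 10) 10 then false
    else czyLoopB (PySem.Int.floordiv m 10)
  else true
termination_by m.toNat
decreasing_by
  rw [PySem.Int.floordiv_eq_ediv_of_pos (by norm_num)]
  omega

def czy_ciekawocyfrowa_alt (n : Int) : Bool := czyLoopB |n|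

-- ===== PRECONDITION & SPEC =====
def Spec_czy_ciekawocyfrowa (n : Int) (out : Bool) : Prop := out = czy_ciekawocyfrowa_alt n
instance (n : Int) (out : Bool) : Decidable (Spec_czy_ciekawocyfrowa n out) := by unfold Spec_czy_ciekawocyfrowa; infer_instance

-- ===== CLAIM =====
def Claim_equal_czy_ciekawocyfrowa : Prop := ∀ (n : Int), Dom_czy_ciekawocyfrowa n → Spec_czy_ciekawocyfrowa n (czy_ciekawocyfrowa n)

-- ===== LEMMAS AND PROOFS =====

-- adjacent-distinct predicate (structural form of A's scan)
def noAdj : List Char → Bool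
  | [] => true
  | [_] => true
  | a :: b :: t => (a ≠ b) && noAdj (b :: t)

theorem czyLoopA_shift (a : Char) (t : List Char) : ∀ i, czyLoopA (a :: t) (i + 1) = czyLoopA t i := by
  intro i
  fun_induction czyLoopA t i with
  | case1 j hlt heq =>
      rw [czyLoopA]
      simp only [List.length_cons, List.getElem_cons_succ]
      rw [dif_pos (by omega), if_pos heq]
  | case2 j hlt hne ih =>
      rw [czyLoopA]
      simp only [List.length_cons, List.getElem_cons_succ]
      rw [dif_pos (by omega), if_neg hne, ih]
  | case3 j h =>
      rw [czyLoopA]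
      simp only [List.length_cons]
      rw [dif_neg (by omega)]

theorem loop_eq_noAdj (l : List Char) : czyLoopA l 0 = noAdj l := by
  match l with
  | [] => rw [czyLoopA]; simp [noAdj]
  | [_] => rw [czyLoopA]; simp [noAdj]
  | a :: b :: t =>
      rw [czyLoopA]
      simp only [List.length_cons]
      rw [dif_pos (by omega)]
      simp only [List.getElem_cons_succ, List.getElem_cons_zero, noAdj]
      by_cases hab : a = b
      · simp [hab]
      · rw [if_neg hab, czyLoopA_shift, loop_eq_noAdj (b :: t)]
        simp [hab]

-- the digit-character list of a natural number, built tail-first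
def natDigits (m : Nat) : List Char :=
  if m < 10 then [Nat.digitChar m]
  else natDigits (m / 10) ++ [Nat.digitChar (m % 10)]
termination_by m
decreasing_by omega

theorem natDigits_small {m : Nat} (h : m < 10) : natDigits m = [Nat.digitChar m] := by
  rw [natDigits, if_pos h]

theorem natDigits_big {m : Nat} (h : ¬ m < 10) :
    natDigits m = natDigits (m / 10) ++ [Nat.digitChar (m % 10)] := by
  rw [natDigits, if_neg h]

theorem toDigitsCore_eq (fuel : Nat) : ∀ (n : Nat) (acc : List Char), n < fuel →
    Nat.toDigitsCore 10 fuel n acc = natDigits n ++ acc := by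
  induction fuel with
  | zero => intro n acc h; omega
  | succ f ih =>
      intro n acc h
      rw [Nat.toDigitsCore]
      by_cases h0 : n / 10 = 0
      · rw [if_pos h0]
        have hn : n < 10 := by omega
        rw [natDigits_small hn, Nat.mod_eq_of_lt hn]
        rfl
      · rw [if_neg h0, ih (n / 10) _ (by omega)]
        rw [natDigits_big (m := n) (by omega)]
        simp

theorem toDigits_eq (n : Nat) : Nat.toDigits 10 n = natDigits n := by
  rw [Nat.toDigits, toDigitsCore_eq (n + 1) n [] (by omega)]
  simp

theorem natDigits_ne_nil (m : Nat) : natDigits m ≠ [] := by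
  rw [natDigits]
  split <;> simp

theorem natDigits_getLast? (m : Nat) : (natDigits m).getLast? = some (Nat.digitChar (m % 10)) := by
  rw [natDigits]
  by_cases h : m < 10
  · rw [if_pos h, Nat.mod_eq_of_lt h]; rfl
  · rw [if_neg h, List.getLast?_concat]

theorem natDigits_digit (m : Nat) : ∀ c ∈ natDigits m, ∃ d, d < 10 ∧ c = Nat.digitChar d := by
  fun_induction natDigits m with
  | case1 m h =>
      intro c hc
      simp only [List.mem_singleton] at hc
      exact ⟨m, by omega, hc⟩
  | case2 m h ih =>
      intro c hc
      rw [List.mem_append] at hc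
      rcases hc with hc | hc
      · exact ih c hc
      · simp only [List.mem_singleton] at hc
        exact ⟨m % 10, by omega, hc⟩

theorem digitChar_ne_dash (d : Nat) (hd : d < 10) : Nat.digitChar d ≠ '-' := by
  interval_cases d <;> decide

theorem digitChar_inj (a b : Nat) (ha : a < 10) (hb : b < 10) :
    (Nat.digitChar a = Nat.digitChar b) ↔ a = b := by
  interval_cases a <;> interval_cases b <;> simp <;> decide

theorem noAdj_append (xs : List Char) (c : Char) :
    noAdj (xs ++ [c]) = (noAdj xs && !(xs.getLast? == some c)) := by
  match xs with
  | [] => simp [noAdj]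
  | [a] => by_cases hac : a = c <;> simp [noAdj, hac]
  | a :: b :: t =>
      have ih := noAdj_append (b :: t) c
      simp only [List.cons_append, noAdj] at *
      rw [ih]
      simp only [List.getLast?_cons_cons]
      rw [Bool.and_assoc]

theorem digits_noAdj (m : Nat) : noAdj (natDigits m) = czyLoopB (m : Int) := by
  fun_induction natDigits m with
  | case1 m h =>
      rw [czyLoopB, dif_neg (by exact_mod_cast by omega)]
      simp [noAdj]
  | case2 m h ih =>
      have hbig : (10 : Int) ≤ (m : Int) := by exact_mod_cast Nat.le_of_not_lt h
      rw [noAdj_append, natDigits_getLast?, ih]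
      conv_rhs => rw [czyLoopB]
      rw [dif_pos hbig]
      have h10 : (10 : Int) = ((10 : Nat) : Int) := by norm_num
      rw [h10, PySem.Int.mod_natCast, PySem.Int.floordiv_natCast, PySem.Int.mod_natCast]
      by_cases he : m % 10 = m / 10 % 10
      · rw [if_pos (by exact_mod_cast he)]
        simp [he]
      · rw [if_neg (fun hh => he (by exact_mod_cast hh))]
        have hne : Nat.digitChar (m / 10 % 10) ≠ Nat.digitChar (m % 10) := by
          intro hh
          exact he ((digitChar_inj _ _ (by omega) (by omega)).mp hh).symm
        simp [hne]

theorem noAdj_dash_cons (m : Nat) : noAdj ('-' :: natDigits m) = noAdj (natDigits m) := by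
  obtain ⟨a, t, hat⟩ := List.exists_cons_of_ne_nil (natDigits_ne_nil m)
  obtain ⟨d, hd, hcd⟩ := natDigits_digit m a (by rw [hat]; exact List.mem_cons_self)
  rw [hat]
  simp only [noAdj]
  have hda : ('-' : Char) ≠ a := by rw [hcd]; exact (digitChar_ne_dash d hd).symm
  rw [decide_eq_true hda, Bool.true_and]

theorem A_eq_noAdj (n : Int) : czy_ciekawocyfrowa n = noAdj ((PySem.Int.toStr n).toList) := by
  unfold czy_ciekawocyfrowa
  set s := (PySem.Int.toStr n).toList with hs
  by_cases h1 : s.length = 1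
  · obtain ⟨a, ha⟩ := List.length_eq_one_iff.mp h1
    rw [if_pos h1, ha]
    rfl
  · rw [if_neg h1, loop_eq_noAdj]

-- ===== VERDICT =====
theorem czy_ciekawocyfrowa_spec : Claim_equal_czy_ciekawocyfrowa := by
  intro n _
  unfold Spec_czy_ciekawocyfrowa czy_ciekawocyfrowa_alt
  rw [A_eq_noAdj, PySem.Int.toList_toStr]
  simp only [PySem.Int.toChars]
  by_cases hneg : n < 0
  · rw [if_pos hneg, toDigits_eq, noAdj_dash_cons, digits_noAdj]
    rw [Int.abs_eq_natAbs]
  · rw [if_neg hneg, toDigits_eq, digits_noAdj]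
    congr 1
    rw [abs_of_nonneg (by omega), Int.toNat_of_nonneg (by omega)]
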